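-- pv_equiv track=rewrite | github.com/GeorgeTCecil/bnbsaver | web_searcher.py | filter_by_domains
-- ===== SOURCE A (Python) =====
-- from typing import List, Dict, Set
--
-- def filter_by_domains(results: List[Dict], exclude_domains: List[str] = None,
--                      include_domains: List[str] = None) -> List[Dict]:
--     """
--     Filter results by domain name.
--
--     Args:
--         results: List of search results
--         exclude_domains: List of domains to exclude (e.g., ['airbnb.com', 'zillow.com'])
--         include_domains: List of domains to include (if specified, only these are kept)
--
--     Returns:
--         Filtered list of results
--     """
--     exclude_domains = exclude_domains or []
--     include_domains = include_domains or []
--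
--     filtered_results = []
--
--     for result in results:
--         url = result.get("link", "")
--
--         # Check exclusions
--         if any(domain in url.lower() for domain in exclude_domains):
--             continue
--
--         # Check inclusions (if specified)
--         if include_domains:
--             if not any(domain in url.lower() for domain in include_domains):
--                 continue
--
--         filtered_results.append(result)
--
--     return filtered_results
-- ===== SOURCE B (Python) =====
-- from typing import List, Dict
--
--
-- def filter_by_domains(results: List[Dict], exclude_domains: List[str] = None,
--                       include_domains: List[str] = None) -> List[Dict]:
--     # Domain-outer mask sweeps: precompute lowered urls once, then each domain
--     # sweeps over all urls updating a boolean mask; final single zip pass selects.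
--     urls = [r.get("link", "").lower() for r in results]
--     dead = [False] * len(urls)
--     for d in (exclude_domains or []):
--         dead = [m or (d in u) for m, u in zip(dead, urls)]
--     if include_domains:
--         wanted = [False] * len(urls)
--         for d in include_domains:
--             wanted = [m or (d in u) for m, u in zip(wanted, urls)]
--     else:
--         wanted = [True] * len(urls)
--     return [r for r, dd, w in zip(results, dead, wanted) if not dd and w]
-- ===== Notes on version B (the rewrite author's own statement) =====
-- stated objective: alternative
-- what changed: Inverts the loop nesting: instead of scanning all domains per result, B precomputes lowercased urls once and iterates over domains in the outer loop, each domain sweeping a boolean exclude/include mask over all urls, then selects results in one final zip pass over the masks.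
import Mathlib
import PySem

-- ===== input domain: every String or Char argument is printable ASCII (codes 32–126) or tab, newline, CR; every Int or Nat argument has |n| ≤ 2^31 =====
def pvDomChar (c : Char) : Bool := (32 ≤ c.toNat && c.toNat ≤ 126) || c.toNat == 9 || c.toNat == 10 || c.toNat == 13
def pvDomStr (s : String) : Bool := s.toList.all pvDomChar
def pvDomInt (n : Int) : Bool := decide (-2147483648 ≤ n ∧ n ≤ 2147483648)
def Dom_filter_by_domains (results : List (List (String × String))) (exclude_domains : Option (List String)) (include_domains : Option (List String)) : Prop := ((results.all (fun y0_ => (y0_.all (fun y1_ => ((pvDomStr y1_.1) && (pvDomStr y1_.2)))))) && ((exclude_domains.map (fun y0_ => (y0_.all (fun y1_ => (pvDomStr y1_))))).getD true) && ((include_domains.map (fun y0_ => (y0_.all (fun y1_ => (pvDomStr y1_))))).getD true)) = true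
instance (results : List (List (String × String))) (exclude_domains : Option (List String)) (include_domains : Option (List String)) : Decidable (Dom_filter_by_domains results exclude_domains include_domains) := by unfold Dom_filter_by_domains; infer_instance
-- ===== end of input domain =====

-- B inverts the loop nesting: domains in the outer loop each sweep a boolean mask
-- over precomputed lowercased urls, then one zip pass selects; objective: alternative.


-- ===== PORT A =====
def filter_by_domains (results : List (List (String × String))) (exclude_domains : Option (List String)) (include_domains : Option (List String)) : List (List (String × String)) :=
  -- exclude_domains = exclude_domains or []   (None and [] are both falsy)
  let excl : List String := exclude_domains.getD []
  let incl : List String := include_domains.getD []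
  -- for result in results: … filtered_results.append(result)
  results.foldl (fun filtered_results result =>
    let url := (PySem.Dict.mk result).getD "link" ""
    if excl.any (fun domain => PySem.Str.isIn domain (PySem.Str.lower url)) then
      filtered_results          -- continue
    else if !incl.isEmpty && !(incl.any (fun domain => PySem.Str.isIn domain (PySem.Str.lower url))) then
      filtered_results          -- continue
    else
      filtered_results ++ [result]) []

-- ===== PORT B =====
-- urls = [r.get("link","").lower() for r in results]
def urlOf (r : List (String × String)) : String :=
  PySem.Str.lower ((PySem.Dict.mk r).getD "link" "")

-- one domain's sweep: mask = [m or (d in u) for m, u in zip(mask, urls)]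
def sweep (urls : List String) (mask : List Bool) (d : String) : List Bool :=
  List.zipWith (fun m u => m || PySem.Str.isIn d u) mask urls

def filter_by_domains_alt (results : List (List (String × String))) (exclude_domains : Option (List String)) (include_domains : Option (List String)) : List (List (String × String)) :=
  let urls := results.map urlOf
  let dead := (exclude_domains.getD []).foldl (sweep urls) (urls.map (fun _ => false))
  let wanted := match include_domains with    -- if include_domains:
    | some ds =>
        if ds.isEmpty then urls.map (fun _ => true)
        else ds.foldl (sweep urls) (urls.map (fun _ => false))
    | none => urls.map (fun _ => true)
  -- [r for r, dd, w in zip(results, dead, wanted) if not dd and w]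
  ((results.zip (dead.zip wanted)).filter (fun x => !x.2.1 && x.2.2)).map Prod.fst

-- ===== PRECONDITION & SPEC =====
def Spec_filter_by_domains (results : List (List (String × String))) (exclude_domains : Option (List String)) (include_domains : Option (List String)) (out : List (List (String × String))) : Prop := out = filter_by_domains_alt results exclude_domains include_domains
instance (results : List (List (String × String))) (exclude_domains : Option (List String)) (include_domains : Option (List String)) (out : List (List (String × String))) : Decidable (Spec_filter_by_domains results exclude_domains include_domains out) := by unfold Spec_filter_by_domains; infer_instance

-- ===== CLAIM =====
def Claim_equal_filter_by_domains : Prop := ∀ (results : List (List (String × String))) (exclude_domains : Option (List String)) (include_domains : Option (List String)), Dom_filter_by_domains results exclude_domains include_domains → Spec_filter_by_domains results exclude_domains include_domains (filter_by_domains results exclude_domains include_domains)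

-- ===== LEMMAS AND PROOFS =====

def matchesD (ds : List String) (r : List (String × String)) : Bool :=
  ds.any (fun d => PySem.Str.isIn d (urlOf r))

-- A's loop body as a single boolean keep-test.
theorem body_eq {T : Type} (p q n : Bool) (acc : List T) (x : T) :
    (if p then acc else if !n && !q then acc else acc ++ [x]) =
    (if (!p && (n || q)) then acc ++ [x] else acc) := by
  cases p <;> cases q <;> cases n <;> simp

-- A's accumulator loop, turned into a filter.
theorem foldl_eq_filter (results : List (List (String × String)))
    (excl incl : List String) :
    (results.foldl (fun filtered_results result =>
      let url := (PySem.Dict.mk result).getD "link" ""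
      if excl.any (fun domain => PySem.Str.isIn domain (PySem.Str.lower url)) then
        filtered_results
      else if !incl.isEmpty && !(incl.any (fun domain => PySem.Str.isIn domain (PySem.Str.lower url))) then
        filtered_results
      else
        filtered_results ++ [result]) []) =
    results.filter (fun r =>
      !(matchesD excl r) && (incl.isEmpty || matchesD incl r)) := by
  have h := PySem.List.foldl_congr_mem
    (l := results) (init := ([] : List (List (String × String))))
    (f := fun filtered_results result =>
      let url := (PySem.Dict.mk result).getD "link" ""
      if excl.any (fun domain => PySem.Str.isIn domain (PySem.Str.lower url)) then
        filtered_results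
      else if !incl.isEmpty && !(incl.any (fun domain => PySem.Str.isIn domain (PySem.Str.lower url))) then
        filtered_results
      else
        filtered_results ++ [result])
    (g := fun filtered_results result =>
      if (!(matchesD excl result) && (incl.isEmpty || matchesD incl result)) then
        filtered_results ++ [result]
      else
        filtered_results)
    (fun acc x _ => body_eq _ _ _ acc x)
  rw [h, PySem.List.foldl_append_if_eq_filter]
  simp

-- zipWith over a mapped copy of the same list is a map.
theorem zipWith_map_self {α β γ : Type} (f : β → α → γ) (g : α → β) (l : List α) :
    List.zipWith f (l.map g) l = l.map (fun u => f (g u) u) := by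
  induction l with
  | nil => rfl
  | cons a t ih => simp [ih]

-- Folding sweeps starting from a mapped mask yields a mapped mask.
theorem foldl_sweep (urls : List String) (ds : List String) (g : String → Bool) :
    ds.foldl (sweep urls) (urls.map g) =
    urls.map (fun u => g u || ds.any (fun d => PySem.Str.isIn d u)) := by
  induction ds generalizing g with
  | nil => simp
  | cons d t ih =>
      simp only [List.foldl_cons, sweep, zipWith_map_self]
      rw [ih]
      simp [Bool.or_assoc]

-- Selecting via masks that are maps of the same list is a filter.
theorem zip_mask_filter {α : Type} (l : List α) (p q : α → Bool) :
    ((l.zip ((l.map p).zip (l.map q))).filter (fun x => !x.2.1 && x.2.2)).map Prod.fst =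
    l.filter (fun r => !p r && q r) := by
  induction l with
  | nil => rfl
  | cons a t ih =>
      by_cases h : (!p a && q a) = true <;> simp [h, ih]

theorem alt_eq_filter (results : List (List (String × String)))
    (e i : Option (List String)) :
    filter_by_domains_alt results e i =
    results.filter (fun r =>
      !(matchesD (e.getD []) r) && ((i.getD []).isEmpty || matchesD (i.getD []) r)) := by
  have hd : ∀ ds : List String,
      ds.foldl (sweep (results.map urlOf)) ((results.map urlOf).map (fun _ => false)) =
      results.map (fun r => matchesD ds r) := by
    intro ds
    rw [foldl_sweep, List.map_map]
    simp [Function.comp_def, matchesD]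
  have ht : (results.map urlOf).map (fun _ => true) = results.map (fun _ => true) := by
    simp [Function.comp_def]
  unfold filter_by_domains_alt
  rcases i with _ | inc
  · simp only [Option.getD_none, hd, ht]
    rw [zip_mask_filter]
    simp
  · simp only [Option.getD_some]
    by_cases hi : inc.isEmpty
    · rw [if_pos hi]
      simp only [hd, ht]
      rw [zip_mask_filter]
      simp [hi]
    · rw [if_neg hi]
      simp only [hd]
      rw [zip_mask_filter]
      have hi' : inc.isEmpty = false := by simpa using hi
      simp [hi']

-- ===== VERDICT =====
theorem filter_by_domains_spec : Claim_equal_filter_by_domains := by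
  intro results e i _
  unfold Spec_filter_by_domains filter_by_domains
  rw [foldl_eq_filter, alt_eq_filter]
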